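-- pv_equiv track=rewrite | github.com/gxh27954/tb | huigui-test1.py | getJqsign
-- ===== SOURCE A (Python) =====
-- def getJqsign(a, k):
--     b = k % 10
--     c = ""
--     d = 0
--     for ch in a:
--         e = ord(ch) ^ b
--         c = c + chr(e)
--     return c
-- ===== SOURCE B (Python) =====
-- def getJqsign(a, k):
--     b = k % 10
--     table = {ord(ch): ord(ch) ^ b for ch in a}
--     return a.translate(table)
-- ===== Notes on version B (the rewrite author's own statement) =====
-- stated objective: idiomatic
-- what changed: Replaces the fused per-character loop with quadratic string concatenation by building a translation table once and applying str.translate in a single call.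
import Mathlib
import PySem

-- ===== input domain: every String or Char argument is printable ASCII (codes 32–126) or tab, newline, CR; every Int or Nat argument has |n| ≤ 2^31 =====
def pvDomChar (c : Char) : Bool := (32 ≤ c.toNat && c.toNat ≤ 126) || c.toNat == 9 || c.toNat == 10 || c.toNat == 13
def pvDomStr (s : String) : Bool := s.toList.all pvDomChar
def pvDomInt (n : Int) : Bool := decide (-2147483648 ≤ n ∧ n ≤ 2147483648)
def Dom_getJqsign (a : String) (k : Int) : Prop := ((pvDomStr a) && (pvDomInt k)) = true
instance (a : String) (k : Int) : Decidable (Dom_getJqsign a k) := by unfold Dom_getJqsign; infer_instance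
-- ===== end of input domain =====

-- ===== PORT A =====
-- B replaces A's fused per-character concatenation loop with a translation-table pass + translate pass (idiomatic).
def getJqsign (a : String) (k : Int) : String :=
  let b := PySem.Int.mod k 10
  -- b = k % 10 is in [0,10), so ord ch ^ b is the Nat xor of the two nonneg ints (exact)
  a.toList.foldl (fun c ch => c ++ String.singleton (Char.ofNat (ch.toNat ^^^ b.toNat))) ""

-- ===== PORT B =====
-- table = {ord(ch): ord(ch) ^ b for ch in a};  a.translate(table): chars with a table entry are mapped, others kept
def getJqsign_alt (a : String) (k : Int) : String :=
  let b := PySem.Int.mod k 10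
  let table : PySem.Dict Nat Nat :=
    a.toList.foldl (fun d ch => d.insert ch.toNat (ch.toNat ^^^ b.toNat)) PySem.Dict.empty
  String.ofList (a.toList.map (fun ch =>
    match table.get? ch.toNat with
    | some v => Char.ofNat v
    | none => ch))

-- ===== PRECONDITION & SPEC =====
def Spec_getJqsign (a : String) (k : Int) (out : String) : Prop := out = getJqsign_alt a k
instance (a : String) (k : Int) (out : String) : Decidable (Spec_getJqsign a k out) := by unfold Spec_getJqsign; infer_instance

-- ===== CLAIM (what is proved, stated in full; the proofs are below) =====
def Claim_equal_getJqsign : Prop := ∀ (a : String) (k : Int), Dom_getJqsign a k → Spec_getJqsign a k (getJqsign a k)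

-- ===== LEMMAS AND PROOFS =====

-- ===== VERDICT (by name: the statement is the Claim_ definition above) =====
lemma tbl_get (bn : Nat) (xs : List Char) (d : PySem.Dict Nat Nat) (c : Char) :
    (xs.foldl (fun d ch => d.insert ch.toNat (ch.toNat ^^^ bn)) d).get? c.toNat =
      if c.toNat ∈ xs.map Char.toNat then some (c.toNat ^^^ bn) else d.get? c.toNat := by
  induction xs generalizing d with
  | nil => simp
  | cons x t ih =>
    simp only [List.foldl_cons, ih, List.map_cons, List.mem_cons]
    by_cases h : c.toNat ∈ t.map Char.toNat
    · simp [h]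
    · simp only [h, or_false, if_false, PySem.Dict.get?_insert]
      split_ifs with hx
      · rw [hx]
      · rfl

lemma foldA (f : Char → Char) (xs : List Char) (s : String) :
    xs.foldl (fun c ch => c ++ String.singleton (f ch)) s = s ++ String.ofList (xs.map f) := by
  induction xs generalizing s with
  | nil =>
    apply String.ext; simp
  | cons x t ih =>
    simp only [List.foldl_cons, ih, List.map_cons]
    apply String.ext
    simp [String.singleton]

-- ===== VERDICT (by name: the statement is the Claim_ definition above) =====
theorem getJqsign_spec : Claim_equal_getJqsign := by
  intro a k _
  unfold Spec_getJqsign getJqsign getJqsign_alt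
  simp only [foldA]
  apply String.ext
  simp only [String.toList_append, String.toList_ofList]
  simp only [String.toList_empty, List.nil_append]
  apply List.map_congr_left
  intro c hc
  rw [tbl_get]
  simp [List.mem_map.mpr ⟨c, hc, rfl⟩]
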